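-- pv_equiv track=rewrite | github.com/smokorg/nano-platform | nanopp/plugins/support.py | normalize_version_string
-- ===== SOURCE A (Python) =====
-- def normalize_version_string(version):
--     if version is None:
--         return None
--     vrs = version.split('.')
--
--     if len(vrs) < 3:
--         n = 3 - len(vrs)
--         while n:
--             vrs.append('0')
--             n -= 1
--         version = '.'.join(vrs)
--
--     return version
-- ===== SOURCE B (Python) =====
-- def normalize_version_string(version):
--     if version is None:
--         return None
--     missing = 2
--     for ch in version:
--         if ch == '.' and missing:
--             missing -= 1
--     return version + '.0' * missing
-- ===== Notes on version B (the rewrite author's own statement) =====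
-- stated objective: simpler
-- what changed: B never splits the string into a list: a single character scan decrements a saturating counter of still-needed parts at each dot, then appends a dot-zero suffix per part still needed, relying on the identity that dot-joining the split parts reconstructs the original string.
import Mathlib
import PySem

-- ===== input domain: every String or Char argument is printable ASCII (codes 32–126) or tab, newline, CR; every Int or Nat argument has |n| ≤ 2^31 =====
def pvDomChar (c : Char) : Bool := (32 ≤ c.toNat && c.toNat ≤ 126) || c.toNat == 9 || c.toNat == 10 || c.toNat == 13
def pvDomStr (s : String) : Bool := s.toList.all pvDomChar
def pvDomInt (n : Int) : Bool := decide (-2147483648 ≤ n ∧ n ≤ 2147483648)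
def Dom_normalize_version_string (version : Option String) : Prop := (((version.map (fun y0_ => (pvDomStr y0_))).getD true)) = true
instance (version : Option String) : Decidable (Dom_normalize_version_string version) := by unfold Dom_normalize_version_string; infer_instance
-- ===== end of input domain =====

-- B never builds the split list: one character scan with a saturating counter, then a '.0' suffix per missing part (objective: simpler).

-- ===== PORT A =====
-- the 'while n: vrs.append('0'); n -= 1' loop
def nvsPad (vrs : List (List Char)) (n : Nat) : List (List Char) :=
  match n with
  | 0 => vrs
  | n + 1 => nvsPad (vrs ++ [['0']]) n

def normalize_version_string (version : Option String) : Option String :=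
  match version with
  | none => none
  | some v =>
    let vrs := PySem.Chars.splitOn v.toList ['.']
    if vrs.length < 3 then
      some (String.ofList (PySem.Chars.join ['.'] (nvsPad vrs (3 - vrs.length))))
    else some v

-- ===== PORT B =====
-- the 'for ch in version: if ch == '.' and missing: missing -= 1' scan
def nvsScan (l : List Char) (missing : Nat) : Nat :=
  match l with
  | [] => missing
  | c :: r => nvsScan r (if c = '.' ∧ missing ≠ 0 then missing - 1 else missing)

-- '.0' * n
def nvsRep (s : List Char) (n : Nat) : List Char :=
  match n with
  | 0 => []
  | n + 1 => s ++ nvsRep s n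

def normalize_version_string_alt (version : Option String) : Option String :=
  match version with
  | none => none
  | some v =>
    some (String.ofList (v.toList ++ nvsRep ['.', '0'] (nvsScan v.toList 2)))

-- ===== PRECONDITION & SPEC =====
def Spec_normalize_version_string (version : Option String) (out : Option String) : Prop := out = normalize_version_string_alt version
instance (version : Option String) (out : Option String) : Decidable (Spec_normalize_version_string version out) := by unfold Spec_normalize_version_string; infer_instance

-- ===== CLAIM (what is proved, stated in full; the proofs are below) =====
def Claim_equal_normalize_version_string : Prop := ∀ (version : Option String), Dom_normalize_version_string version → Spec_normalize_version_string version (normalize_version_string version)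

-- ===== LEMMAS AND PROOFS =====

-- (first piece, remaining pieces) of splitting on '.'
def nvsF : List Char → List Char × List (List Char)
  | [] => ([], [])
  | c :: r => if c = '.' then ([], (nvsF r).1 :: (nvsF r).2) else (c :: (nvsF r).1, (nvsF r).2)

theorem nvsF_nil : nvsF [] = ([], []) := rfl

theorem nvsF_cons (c : Char) (r : List Char) :
    nvsF (c :: r) = if c = '.' then ([], (nvsF r).1 :: (nvsF r).2) else (c :: (nvsF r).1, (nvsF r).2) := rfl

set_option maxRecDepth 4096 in
theorem nvs_go_split (l : List Char) : ∀ (fuel : Nat) (cur : List Char) (acc : List (List Char)),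
    l.length < fuel →
    PySem.Chars.splitOn.go ['.'] fuel l cur acc
      = acc.reverse ++ (cur.reverse ++ (nvsF l).1) :: (nvsF l).2 := by
  induction l with
  | nil =>
    intro fuel cur acc h
    match fuel with
    | f + 1 => simp [PySem.Chars.splitOn.go, nvsF_nil]
  | cons c r ih =>
    intro fuel cur acc h
    match fuel with
    | f + 1 =>
      by_cases hc : c = '.'
      · subst hc
        simp only [PySem.Chars.splitOn.go, List.isPrefixOf, beq_self_eq_true, Bool.true_and,
          if_true, List.length_cons, List.length_nil, List.drop_succ_cons, List.drop_zero]
        rw [ih f [] (cur.reverse :: acc) (by simpa using Nat.lt_of_succ_lt_succ h)]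
        rw [nvsF_cons]
        simp
      · simp only [PySem.Chars.splitOn.go, List.isPrefixOf]
        have hb : ('.' == c) = false := beq_eq_false_iff_ne.mpr (Ne.symm hc)
        simp only [hb, Bool.false_and, Bool.false_eq_true, if_false]
        rw [ih f (c :: cur) acc (by simpa using Nat.lt_of_succ_lt_succ h)]
        rw [nvsF_cons]
        simp [hc]

theorem nvs_split_eq (s : List Char) :
    PySem.Chars.splitOn s ['.'] = (nvsF s).1 :: (nvsF s).2 := by
  unfold PySem.Chars.splitOn
  rw [nvs_go_split s (s.length + 1) [] [] (Nat.lt_succ_self _)]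
  simp

-- the saturating scan computes m minus the dot count, floored at 0
theorem nvs_scan_eq (s : List Char) : ∀ m : Nat,
    nvsScan s m = m - min m (nvsF s).2.length := by
  induction s with
  | nil => intro m; simp [nvsScan, nvsF_nil]
  | cons c r ih =>
    intro m
    rw [nvsScan]
    by_cases hc : c = '.'
    · match m with
      | 0 =>
        simp only [hc, ne_eq, not_true_eq_false, and_false, if_false] at *
        rw [ih 0]; omega
      | m + 1 =>
        simp only [hc, ne_eq, Nat.succ_ne_zero, not_false_eq_true, and_true, if_true,
          Nat.add_sub_cancel]
        rw [ih m, nvsF_cons, if_pos rfl]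
        simp only [List.length_cons]
        omega
    · simp only [hc, false_and, if_false]
      rw [ih m, nvsF_cons, if_neg hc]

theorem nvs_ic_two (sep h a : List Char) (t : List (List Char)) :
    List.intercalate sep (h :: a :: t) = h ++ sep ++ List.intercalate sep (a :: t) := by
  simp [List.intercalate]

theorem nvs_ic_one (sep h : List Char) : List.intercalate sep [h] = h := by
  simp [List.intercalate]

theorem nvs_reconstruct (s : List Char) :
    List.intercalate ['.'] ((nvsF s).1 :: (nvsF s).2) = s := by
  induction s with
  | nil => simp [nvsF_nil, nvs_ic_one]
  | cons c r ih =>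
    rw [nvsF_cons]
    by_cases hc : c = '.'
    · simp only [hc, if_true]
      rw [nvs_ic_two]
      simpa using ih
    · simp only [hc, if_false]
      rcases hr : (nvsF r).2 with _ | ⟨a, t⟩
      · rw [hr] at ih
        simp only [nvs_ic_one] at ih ⊢
        simp [ih]
      · rw [hr] at ih
        rw [nvs_ic_two] at ih ⊢
        simp only [List.cons_append, List.append_assoc] at ih ⊢
        rw [ih]

theorem nvs_ic3 (p : List Char) :
    List.intercalate ['.'] [p, ['0'], ['0']] = p ++ ['.', '0', '.', '0'] := by
  rw [nvs_ic_two, nvs_ic_two, nvs_ic_one]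
  simp

theorem nvs_ic2 (p a : List Char) :
    List.intercalate ['.'] [p, a, ['0']] = (p ++ ['.'] ++ a) ++ ['.', '0'] := by
  rw [nvs_ic_two, nvs_ic_two, nvs_ic_one]
  simp

-- ===== VERDICT (by name: the statement is the Claim_ definition above) =====
theorem normalize_version_string_spec : Claim_equal_normalize_version_string := by
  intro version _
  unfold Spec_normalize_version_string
  match version with
  | none => rfl
  | some v =>
    simp only [normalize_version_string, normalize_version_string_alt,
      nvs_split_eq, nvs_scan_eq]
    have hj := nvs_reconstruct v.toList
    rcases h2 : (nvsF v.toList).2 with _ | ⟨a, t⟩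
    · -- one piece: pad with two '0's
      rw [h2] at hj
      rw [nvs_ic_one] at hj
      simp only [List.length_nil]
      norm_num
      simp only [nvsPad, PySem.Chars.join, nvsRep]
      simp only [List.nil_append, List.cons_append, List.append_nil]
      rw [nvs_ic3, hj]
      simp [String.ofList_append]
    · rcases t with _ | ⟨b, t⟩
      · -- two pieces: pad with one '0'
        rw [h2] at hj
        rw [nvs_ic_two, nvs_ic_one] at hj
        simp only [List.length_cons, List.length_nil]
        norm_num
        simp only [nvsPad, PySem.Chars.join, nvsRep]
        simp only [List.nil_append, List.cons_append, List.append_nil]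
        rw [nvs_ic2, hj]
        simp [String.ofList_append]
      · -- three or more pieces: both return the input unchanged
        simp only [List.length_cons]
        have hm : min 2 (t.length + 1 + 1) = 2 := by omega
        rw [hm]
        simp [nvsRep]
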